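-- pv_equiv track=rewrite | github.com/IvanRenison/ProgrammingProblems | Training Camp Argentina - 2022/#3/J.py | solve
-- ===== SOURCE A (Python) =====
-- def solve(s: str) -> int:
--     n = len(s)
--
--     best_doubleing = None
--
--     i = 1
--     while 2*i <= n:
--         if s[0:i] + s[0:i] == s[0:2*i]:
--             best_doubleing = i
--         i += 1
--
--     if best_doubleing == None:
--         return n
--     else:
--         return n - best_doubleing + 1
-- ===== SOURCE B (Python) =====
-- def solve(s: str) -> int:
--     n = len(s)
--     # Z-function: z[i] = length of longest common prefix of s and s[i:]
--     z = [0] * n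
--     l = 0
--     r = 0
--     for i in range(1, n):
--         zi = min(r - i, z[i - l]) if i < r else 0
--         while i + zi < n and s[zi] == s[i + zi]:
--             zi += 1
--         z[i] = zi
--         if i + zi > r:
--             l = i
--             r = i + zi
--     best = 0
--     for i in range(1, n // 2 + 1):
--         if z[i] >= i:
--             best = i
--     return n - best + 1 if best else n
-- ===== Notes on version B (the rewrite author's own statement) =====
-- stated objective: faster
-- what changed: Replaces the quadratic scan that rebuilds and compares prefix slices for every candidate i with a single O(n) Z-function pass; each candidate doubling length i is then tested in O(1) via z[i] >= i.
import Mathlib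
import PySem

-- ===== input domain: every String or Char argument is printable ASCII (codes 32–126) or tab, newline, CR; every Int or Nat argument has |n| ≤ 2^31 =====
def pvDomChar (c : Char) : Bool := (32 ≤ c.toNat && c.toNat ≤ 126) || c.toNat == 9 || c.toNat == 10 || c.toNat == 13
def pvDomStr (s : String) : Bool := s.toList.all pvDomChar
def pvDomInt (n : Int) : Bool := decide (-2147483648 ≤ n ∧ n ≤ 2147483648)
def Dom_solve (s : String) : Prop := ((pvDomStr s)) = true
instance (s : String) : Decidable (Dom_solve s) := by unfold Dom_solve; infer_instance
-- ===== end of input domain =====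

-- B replaces A's quadratic rebuild-and-compare of prefix slices by a linear Z-function pass (objective: faster).

-- ===== PORT A =====
-- while 2*i <= n: if s[0:i]+s[0:i] == s[0:2*i]: best = i; i += 1
def aLoop (cs : List Char) (n : Nat) (i : Nat) (best : Option Nat) : Option Nat :=
  if h : 2*i ≤ n then
    aLoop cs n (i+1)
      (if PySem.List.slice cs (some 0) (some (i:Int)) ++ PySem.List.slice cs (some 0) (some (i:Int))
          = PySem.List.slice cs (some 0) (some (2*(i:Int))) then some i else best)
  else best
termination_by n + 2 - 2*i
decreasing_by omega

def solve (s : String) : Int :=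
  let cs := s.toList
  let n := cs.length
  match aLoop cs n 1 none with
  | none => (n : Int)
  | some b => (n : Int) - b + 1

-- ===== PORT B =====
-- the inner 'while i + zi < n and s[zi] == s[i+zi]: zi += 1' (indices are in range whenever taken, so getD is exact)
def zExt (cs : List Char) (n : Nat) (i : Nat) (c : Nat) : Nat :=
  if h : i + c < n ∧ cs.getD c ' ' = cs.getD (i+c) ' ' then zExt cs n i (c+1) else c
termination_by n - (i + c)
decreasing_by omega

-- one iteration of the Z-function loop over state (z, l, r)
def zStep (cs : List Char) (n : Nat) (st : List Nat × Nat × Nat) (i : Nat) : List Nat × Nat × Nat :=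
  let c := if i < st.2.2 then min (st.2.2 - i) (st.1.getD (i - st.2.1) 0) else 0
  let zi := zExt cs n i c
  let z' := st.1.set i zi
  if st.2.2 < i + zi then (z', i, i + zi) else (z', st.2.1, st.2.2)

def solve_alt (s : String) : Int :=
  let cs := s.toList
  let n := cs.length
  let z := ((List.range' 1 (n-1)).foldl (zStep cs n) (List.replicate n 0, 0, 0)).1
  let best := (List.range' 1 (n/2)).foldl (fun b i => if i ≤ z.getD i 0 then i else b) 0
  if best = 0 then (n : Int) else (n : Int) - best + 1

-- ===== PRECONDITION & SPEC =====
def Spec_solve (s : String) (out : Int) : Prop := out = solve_alt s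
instance (s : String) (out : Int) : Decidable (Spec_solve s out) := by unfold Spec_solve; infer_instance

-- ===== CLAIM (what is proved, stated in full; the proofs are below) =====
def Claim_equal_solve : Prop := ∀ (s : String), Dom_solve s → Spec_solve s (solve s)

-- ===== LEMMAS AND PROOFS =====

-- length of the longest common prefix
def lcp : List Char → List Char → Nat
  | a::as, b::bs => if a = b then lcp as bs + 1 else 0
  | _, _ => 0

theorem lcp_le_right : ∀ (a b : List Char), lcp a b ≤ b.length := by
  intro a
  induction a with
  | nil => intro b; cases b <;> simp [lcp]
  | cons x as ih =>
    intro b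
    cases b with
    | nil => simp [lcp]
    | cons y bs =>
      simp only [lcp, List.length_cons]
      split
      · exact Nat.succ_le_succ (ih bs)
      · omega

theorem le_lcp_iff : ∀ (a b : List Char) (k : Nat), k ≤ a.length → k ≤ b.length →
    (k ≤ lcp a b ↔ a.take k = b.take k) := by
  intro a
  induction a with
  | nil =>
    intro b k ha hb
    have hk : k = 0 := by simpa using ha
    subst hk
    simp
  | cons x as ih =>
    intro b k ha hb
    cases b with
    | nil =>
      have hk : k = 0 := by simpa using hb
      subst hk
      simp
    | cons y bs =>
      cases k with
      | zero => simp
      | succ k =>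
        simp only [lcp, List.take_succ_cons]
        by_cases h : x = y
        · subst h
          rw [if_pos rfl, Nat.succ_le_succ_iff, ih bs k (by simpa using ha) (by simpa using hb)]
          simp
        · rw [if_neg h]
          simp [h]

theorem getD_eq_of_lt_lcp : ∀ (a b : List Char) (k : Nat) (d : Char),
    k < lcp a b → a.getD k d = b.getD k d := by
  intro a
  induction a with
  | nil => intro b k d h; cases b <;> simp [lcp] at h
  | cons x as ih =>
    intro b k d h
    cases b with
    | nil => simp [lcp] at h
    | cons y bs =>
      simp only [lcp] at h
      by_cases hxy : x = y
      · rw [if_pos hxy] at h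
        cases k with
        | zero => simpa using hxy
        | succ k =>
          simp only [List.getD_cons_succ]
          exact ih bs k d (by omega)
      · rw [if_neg hxy] at h
        omega

theorem getD_ne_at_lcp : ∀ (a b : List Char) (d : Char),
    lcp a b < a.length → lcp a b < b.length → a.getD (lcp a b) d ≠ b.getD (lcp a b) d := by
  intro a
  induction a with
  | nil => intro b d h _; simp at h
  | cons x as ih =>
    intro b d ha hb
    cases b with
    | nil => simp at hb
    | cons y bs =>
      by_cases hxy : x = y
      · have hrw : lcp (x::as) (y::bs) = lcp as bs + 1 := by simp [lcp, hxy]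
        rw [hrw] at ha hb ⊢
        simp only [List.getD_cons_succ]
        exact ih bs d (by simpa using ha) (by simpa using hb)
      · have hrw : lcp (x::as) (y::bs) = 0 := by simp [lcp, hxy]
        rw [hrw]
        simpa using hxy

theorem getD_drop (l : List Char) (i k : Nat) (d : Char) :
    (l.drop i).getD k d = l.getD (i+k) d := by
  simp [List.getD_eq_getElem?_getD, List.getElem?_drop]

theorem take_eq_of_getD (a b : List Char) (c : Nat) (ha : c ≤ a.length) (hb : c ≤ b.length)
    (h : ∀ k, k < c → a.getD k ' ' = b.getD k ' ') : a.take c = b.take c := by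
  apply List.ext_getElem
  · simp; omega
  · intro i h1 h2
    simp only [List.getElem_take]
    have hia : i < a.length := by simp at h1; omega
    have hib : i < b.length := by simp at h2; omega
    have := h i (by simp at h1; omega)
    rwa [List.getD_eq_getElem a ' ' hia, List.getD_eq_getElem b ' ' hib] at this

theorem zExt_eq (cs : List Char) (i : Nat) : ∀ (c : Nat), c ≤ lcp cs (cs.drop i) →
    zExt cs cs.length i c = lcp cs (cs.drop i) := by
  set L := lcp cs (cs.drop i) with hL
  have hLd : L ≤ cs.length - i := by
    have := lcp_le_right cs (cs.drop i); simpa using this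
  intro c hc
  induction hk : L - c generalizing c with
  | zero =>
    have hcL : c = L := by omega
    subst hcL
    rw [zExt]
    rw [dif_neg]
    rintro ⟨h1, h2⟩
    -- mismatch at index L: contradiction with maximality of lcp
    have hlt1 : L < cs.length := by omega
    have hlt2 : L < (cs.drop i).length := by simp; omega
    exact getD_ne_at_lcp cs (cs.drop i) ' ' hlt1 hlt2 (by rw [getD_drop]; exact h2)
  | succ m ih =>
    have hcL : c < L := by omega
    rw [zExt, dif_pos]
    · exact ih (c+1) (by omega) (by omega)
    · constructor
      · omega
      · have := getD_eq_of_lt_lcp cs (cs.drop i) c ' ' (by omega)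
        rwa [getD_drop] at this

-- the Z-loop invariant: processed entries hold lcp values, (l,r) is a valid Z-box
def ZInv (cs : List Char) (i : Nat) (st : List Nat × Nat × Nat) : Prop :=
  st.1.length = cs.length ∧ st.2.1 < i ∧ st.2.1 ≤ st.2.2 ∧ st.2.2 ≤ cs.length ∧
  (st.2.1 = 0 → st.2.2 = 0) ∧
  st.2.2 - st.2.1 ≤ lcp cs (cs.drop st.2.1) ∧
  (∀ j, 1 ≤ j → j < i → st.1.getD j 0 = lcp cs (cs.drop j))

theorem getD_set_self (z : List Nat) (i v : Nat) (h : i < z.length) :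
    (z.set i v).getD i 0 = v := by
  simp [List.getD_eq_getElem?_getD, h]

theorem getD_set_ne (z : List Nat) (i j v : Nat) (h : i ≠ j) :
    (z.set i v).getD j 0 = z.getD j 0 := by
  simp [List.getD_eq_getElem?_getD, h]

theorem zStep_inv (cs : List Char) (i : Nat) (st : List Nat × Nat × Nat)
    (h1 : 1 ≤ i) (h2 : i < cs.length) (h : ZInv cs i st) :
    ZInv cs (i+1) (zStep cs cs.length st i) := by
  obtain ⟨hlen, hli, hlr, hrn, hl0, hbox, hz⟩ := h
  obtain ⟨z, l, r⟩ := st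
  simp only at hlen hli hlr hrn hl0 hbox hz
  have hLd : lcp cs (cs.drop i) ≤ cs.length - i := by
    have := lcp_le_right cs (cs.drop i); simpa using this
  -- the starting value c is sound: take c cs = take c (drop i cs)
  have hc : (if i < r then min (r - i) (z.getD (i - l) 0) else 0) ≤ lcp cs (cs.drop i) := by
    by_cases hir : i < r
    · rw [if_pos hir]
      have hl1 : 1 ≤ l := by
        by_contra hh
        have hh0 : l = 0 := by omega
        have := hl0 hh0
        omega
      set c := min (r - i) (z.getD (i - l) 0) with hcdef
      have hzil : z.getD (i - l) 0 = lcp cs (cs.drop (i - l)) := hz (i - l) (by omega) (by omega)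
      have hkey : ∀ k, k < c → cs.getD k ' ' = (cs.drop i).getD k ' ' := by
        intro k hk
        have hk1 : k < lcp cs (cs.drop (i - l)) := by rw [← hzil]; omega
        have e1 : cs.getD k ' ' = cs.getD (i - l + k) ' ' := by
          have := getD_eq_of_lt_lcp cs (cs.drop (i-l)) k ' ' hk1
          rwa [getD_drop] at this
        have hm : i - l + k < lcp cs (cs.drop l) := by omega
        have e2 : cs.getD (i - l + k) ' ' = cs.getD (i + k) ' ' := by
          have := getD_eq_of_lt_lcp cs (cs.drop l) (i - l + k) ' ' hm
          rw [getD_drop] at this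
          have harith : l + (i - l + k) = i + k := by omega
          rw [harith] at this
          exact this
        rw [e1, e2, getD_drop]
      have hcn : c ≤ cs.length - i := by omega
      rw [le_lcp_iff cs (cs.drop i) c (by omega) (by simp; omega)]
      exact take_eq_of_getD cs (cs.drop i) c (by omega) (by simp; omega) hkey
    · rw [if_neg hir]; omega
  have hzi : zExt cs cs.length i (if i < r then min (r - i) (z.getD (i - l) 0) else 0)
      = lcp cs (cs.drop i) := zExt_eq cs i _ hc
  unfold zStep
  dsimp only
  rw [hzi]
  set zi := lcp cs (cs.drop i) with hzidef
  have hset : ∀ j, 1 ≤ j → j < i + 1 → (z.set i zi).getD j 0 = lcp cs (cs.drop j) := by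
    intro j hj1 hj2
    by_cases hji : j = i
    · subst hji; rw [getD_set_self z j zi (by omega)]
    · rw [getD_set_ne z i j zi (by omega)]
      exact hz j hj1 (by omega)
  by_cases hbr : r < i + zi
  · rw [if_pos hbr]
    refine ⟨by dsimp only; simpa using hlen, by dsimp only; omega, by dsimp only; omega,
      by dsimp only; omega, by dsimp only; omega, by dsimp only; omega, by dsimp only; exact hset⟩
  · rw [if_neg hbr]
    exact ⟨by dsimp only; simpa using hlen, by dsimp only; omega, hlr, hrn, hl0, hbox,
      by dsimp only; exact hset⟩

theorem zFold_inv (cs : List Char) : ∀ (k i : Nat) (st : List Nat × Nat × Nat),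
    1 ≤ i → i + k ≤ cs.length → ZInv cs i st →
    ZInv cs (i+k) ((List.range' i k).foldl (zStep cs cs.length) st) := by
  intro k
  induction k with
  | zero => intro i st _ _ h; simpa using h
  | succ m ih =>
    intro i st hi hk h
    rw [List.range'_succ, List.foldl_cons]
    have := ih (i+1) (zStep cs cs.length st i) (by omega) (by omega)
      (zStep_inv cs i st hi (by omega) h)
    have harith : i + (m + 1) = (i + 1) + m := by omega
    rw [harith]
    exact this

theorem zInv_init (cs : List Char) : ZInv cs 1 (List.replicate cs.length 0, 0, 0) := by
  refine ⟨by simp, by dsimp only; omega, by dsimp only; omega, by dsimp only; omega,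
    fun _ => rfl, by dsimp only; simp, ?_⟩
  intro j hj1 hj2; omega

-- A's slice test equals the Z test, for 1 ≤ i with 2*i ≤ n
theorem cond_iff (cs : List Char) (i : Nat) (h2i : 2*i ≤ cs.length) :
    (PySem.List.slice cs (some 0) (some (i:Int)) ++ PySem.List.slice cs (some 0) (some (i:Int))
       = PySem.List.slice cs (some 0) (some (2*(i:Int)))
     ↔ i ≤ lcp cs (cs.drop i)) := by
  have e1 : PySem.List.slice cs (some (0:Int)) (some (i:Int)) = cs.take i := by
    have h := PySem.List.slice_natCast (xs := cs) (a := 0) (b := i)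
    simp only [Nat.cast_zero] at h
    simpa using h
  have e2 : PySem.List.slice cs (some (0:Int)) (some (2*(i:Int))) = cs.take (2*i) := by
    have hcast : (2*(i:Int)) = ((2*i : Nat) : Int) := by push_cast; ring
    rw [hcast]
    have := PySem.List.slice_natCast (xs := cs) (a := 0) (b := 2*i)
    simpa using this
  rw [e1, e2]
  have e3 : cs.take (2*i) = cs.take i ++ (cs.drop i).take i := by
    have : 2*i = i + i := by omega
    rw [this, List.take_add]
  rw [e3, List.append_cancel_left_eq]
  rw [le_lcp_iff cs (cs.drop i) i (by omega) (by simp; omega)]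

-- relation between A's Option accumulator and B's 0-sentinel accumulator
def orel (o : Option Nat) (b : Nat) : Prop := (o = none ∧ b = 0) ∨ (o = some b ∧ 1 ≤ b)

theorem loop_rel (cs : List Char) (z : List Nat)
    (hz : ∀ j, 1 ≤ j → j < cs.length → z.getD j 0 = lcp cs (cs.drop j)) :
    ∀ (k i : Nat) (o : Option Nat) (b : Nat), k = cs.length/2 + 1 - i → 1 ≤ i → orel o b →
    orel (aLoop cs cs.length i o)
      ((List.range' i (cs.length/2 + 1 - i)).foldl (fun b j => if j ≤ z.getD j 0 then j else b) b) := by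
  intro k
  induction k with
  | zero =>
    intro i o b hk hi ho
    have hni : ¬ (2*i ≤ cs.length) := by omega
    rw [aLoop, dif_neg hni, ← hk]
    simpa using ho
  | succ m ih =>
    intro i o b hk hi ho
    have h2i : 2*i ≤ cs.length := by omega
    have hin : i < cs.length := by omega
    rw [aLoop, dif_pos h2i, ← hk, List.range'_succ, List.foldl_cons]
    have hcond := cond_iff cs i h2i
    have hzi := hz i hi hin
    have hrest : m = cs.length/2 + 1 - (i+1) := by omega
    rw [hrest]
    apply ih (i+1) _ _ hrest (by omega)
    by_cases hcc : PySem.List.slice cs (some 0) (some (i:Int)) ++ PySem.List.slice cs (some 0) (some (i:Int))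
        = PySem.List.slice cs (some 0) (some (2*(i:Int)))
    · rw [if_pos hcc, if_pos (by rw [hzi]; exact hcond.mp hcc)]
      exact Or.inr ⟨rfl, hi⟩
    · rw [if_neg hcc, if_neg (by rw [hzi]; exact fun hle => hcc (hcond.mpr hle))]
      exact ho

-- ===== VERDICT (by name: the statement is the Claim_ definition above) =====
theorem solve_spec : Claim_equal_solve := by
  intro s _
  unfold Spec_solve solve solve_alt
  dsimp only
  set cs := s.toList with hcs
  have hz : ∀ j, 1 ≤ j → j < cs.length →
      ((List.range' 1 (cs.length-1)).foldl (zStep cs cs.length)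
        (List.replicate cs.length 0, 0, 0)).1.getD j 0 = lcp cs (cs.drop j) := by
    intro j hj1 hj2
    have hinv := zFold_inv cs (cs.length-1) 1 _ (by omega) (by omega) (zInv_init cs)
    have harith : 1 + (cs.length - 1) = cs.length := by omega
    rw [harith] at hinv
    exact hinv.2.2.2.2.2.2 j hj1 hj2
  have hrel := loop_rel cs _ hz (cs.length/2 + 1 - 1) 1 none 0 rfl (by omega)
    (Or.inl ⟨rfl, rfl⟩)
  have har : cs.length/2 + 1 - 1 = cs.length/2 := by omega
  rw [har] at hrel
  rcases hrel with ⟨h1, h2⟩ | ⟨h1, h2⟩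
  · rw [h1, h2]
    simp
  · rw [h1]
    rw [if_neg (by omega)]
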